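-- pv_equiv track=rewrite | github.com/misakajolno/MoeGirlTagger | apps/pyside/moegirl_tagger_gui_tag_editor_dialog.py | pick_localized_alias
-- ===== SOURCE A (Python) =====
-- def _normalized_language(value: str) -> str:
--     text = str(value or "").strip()
--     lowered = text.lower().replace("_", "-")
--     if lowered.startswith("ja"):
--         return "ja-JP"
--     if lowered.startswith("en"):
--         return "en-US"
--     if lowered.startswith("ko"):
--         return "ko-KR"
--     return "zh-CN"
--
-- def _language_priority(language_code: str) -> list[str]:
--     current = _normalized_language(language_code)
--     ordered = [current, "ja-JP", "en-US", "zh-CN", "ko-KR"]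
--     result: list[str] = []
--     for code in ordered:
--         if code not in result:
--             result.append(code)
--     return result
--
-- def pick_localized_alias(language_code: str, aliases: object, fallback_text: str) -> str:
--     """Pick alias text with current-language -> Japanese -> English fallback."""
--     entries = aliases if isinstance(aliases, list) else []
--     by_language: dict[str, str] = {}
--     for entry in entries:
--         if not isinstance(entry, dict):
--             continue
--         name = str(entry.get("name", "")).strip()
--         if not name:
--             continue
--         lang = _normalized_language(str(entry.get("language", "")).strip())
--         if lang not in by_language:
--             by_language[lang] = name
--
--     for code in _language_priority(language_code):
--         value = by_language.get(code, "")
--         if value: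
--             return value
--
--     for value in by_language.values():
--         if value:
--             return value
--
--     return str(fallback_text or "").strip()
-- ===== SOURCE B (Python) =====
-- def _normalized_language(value: str) -> str:
--     text = str(value or "").strip()
--     lowered = text.lower().replace("_", "-")
--     if lowered.startswith("ja"):
--         return "ja-JP"
--     if lowered.startswith("en"):
--         return "en-US"
--     if lowered.startswith("ko"):
--         return "ko-KR"
--     return "zh-CN"
--
--
-- def _language_priority(language_code: str) -> list[str]:
--     current = _normalized_language(language_code)
--     ordered = [current, "ja-JP", "en-US", "zh-CN", "ko-KR"]
--     result: list[str] = []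
--     for code in ordered:
--         if code not in result:
--             result.append(code)
--     return result
--
--
-- def pick_localized_alias(language_code: str, aliases: object, fallback_text: str) -> str:
--     """Pick alias text with current-language -> Japanese -> English fallback.
--
--     No index dict: for each priority code, scan the entries for the first one
--     whose normalized language is that code and whose stripped name is non-empty.
--     The priority list always contains every normalized code, so no extra
--     "any value" pass is needed.
--     """
--     entries = aliases if isinstance(aliases, list) else []
--     for code in _language_priority(language_code):
--         for entry in entries:
--             if not isinstance(entry, dict):
--                 continue
--             name = str(entry.get("name", "")).strip()
--             if not name:
--                 continue
--             if _normalized_language(str(entry.get("language", "")).strip()) == code: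
--                 return name
--     return str(fallback_text or "").strip()
-- ===== Notes on version B (the rewrite author's own statement) =====
-- stated objective: alternative
-- what changed: B drops the by_language dict entirely: for each code in the priority list it scans the entries for the first valid match, and it omits A's dead 'any value' pass (the priority list always covers every normalized code), falling straight back to the stripped fallback_text.
import Mathlib
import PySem

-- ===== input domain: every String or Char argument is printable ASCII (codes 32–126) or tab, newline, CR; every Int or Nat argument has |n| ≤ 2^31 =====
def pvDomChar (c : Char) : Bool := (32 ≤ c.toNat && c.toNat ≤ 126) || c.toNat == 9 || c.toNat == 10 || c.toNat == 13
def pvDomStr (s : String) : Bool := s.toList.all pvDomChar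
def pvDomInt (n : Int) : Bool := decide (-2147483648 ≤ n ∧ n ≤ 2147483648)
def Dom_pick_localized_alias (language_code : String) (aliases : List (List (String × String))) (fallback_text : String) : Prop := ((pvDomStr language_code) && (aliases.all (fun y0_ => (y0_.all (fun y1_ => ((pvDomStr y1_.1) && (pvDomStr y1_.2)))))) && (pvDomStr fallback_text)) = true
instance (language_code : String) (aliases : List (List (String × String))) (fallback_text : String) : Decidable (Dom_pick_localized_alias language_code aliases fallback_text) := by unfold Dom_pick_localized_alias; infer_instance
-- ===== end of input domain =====

-- B eliminates A's by_language index dict (per-priority-code scan of the entries instead) and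
-- A's dead "any value" pass; same return value, objective: alternative decomposition.

-- ===== PORT A =====
-- shared module helpers (_normalized_language, _language_priority) and entry.get(k, "")
def pvNormLang (value : String) : String :=
  let text := PySem.Str.strip value
  let lowered := PySem.Str.replace (PySem.Str.lower text) "_" "-"
  if PySem.Str.startswith lowered "ja" then "ja-JP"
  else if PySem.Str.startswith lowered "en" then "en-US"
  else if PySem.Str.startswith lowered "ko" then "ko-KR"
  else "zh-CN"

def pvLangPriority (language_code : String) : List String :=
  let current := pvNormLang language_code
  [current, "ja-JP", "en-US", "zh-CN", "ko-KR"].foldl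
    (fun result code => if result.contains code then result else result ++ [code]) []

-- entry.get(k, "") on a dict entry (association list, first match)
def pvEntryGet (entry : List (String × String)) (k : String) : String :=
  (entry.lookup k).getD ""

-- the body of A's index-building loop
def pvStep (d : PySem.Dict String String) (entry : List (String × String)) : PySem.Dict String String :=
  let name := PySem.Str.strip (pvEntryGet entry "name")
  if name = "" then d
  else
    let lang := pvNormLang (PySem.Str.strip (pvEntryGet entry "language"))
    if d.contains lang then d else d.insert lang name

-- A's first loop: for code in priority: value = by_language.get(code, ""); if value: return value
def pvFirstCode (d : PySem.Dict String String) : List String → Option String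
  | [] => none
  | c :: rest => if d.getD c "" ≠ "" then some (d.getD c "") else pvFirstCode d rest

-- A's second loop: for value in by_language.values(): if value: return value
def pvFirstVal : List String → Option String
  | [] => none
  | v :: rest => if v ≠ "" then some v else pvFirstVal rest

-- the two early-return loops chained with `Option.or`, then the final fallback
def pick_localized_alias (language_code : String) (aliases : List (List (String × String))) (fallback_text : String) : String :=
  let by_language := aliases.foldl pvStep (PySem.Dict.empty)
  ((pvFirstCode by_language (pvLangPriority language_code)).or
    (pvFirstVal by_language.values)).getD (PySem.Str.strip fallback_text)

-- ===== PORT B =====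
-- inner loop of B: first entry with non-empty stripped name whose normalized language is `code`
def pvScanEntries (code : String) : List (List (String × String)) → Option String
  | [] => none
  | e :: rest =>
    let name := PySem.Str.strip (pvEntryGet e "name")
    if name = "" then pvScanEntries code rest
    else if pvNormLang (PySem.Str.strip (pvEntryGet e "language")) = code then some name
    else pvScanEntries code rest

-- outer loop of B over the priority codes
def pvScanCodes (entries : List (List (String × String))) : List String → Option String
  | [] => none
  | c :: cs =>
    match pvScanEntries c entries with
    | some v => some v
    | none => pvScanCodes entries cs

def pick_localized_alias_alt (language_code : String) (aliases : List (List (String × String))) (fallback_text : String) : String :=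
  (pvScanCodes aliases (pvLangPriority language_code)).getD (PySem.Str.strip fallback_text)

-- ===== PRECONDITION & SPEC =====
def Spec_pick_localized_alias (language_code : String) (aliases : List (List (String × String))) (fallback_text : String) (out : String) : Prop := out = pick_localized_alias_alt language_code aliases fallback_text
instance (language_code : String) (aliases : List (List (String × String))) (fallback_text : String) (out : String) : Decidable (Spec_pick_localized_alias language_code aliases fallback_text out) := by unfold Spec_pick_localized_alias; infer_instance

-- ===== CLAIM (what is proved, stated in full; the proofs are below) =====
def Claim_equal_pick_localized_alias : Prop := ∀ (language_code : String) (aliases : List (List (String × String))) (fallback_text : String), Dom_pick_localized_alias language_code aliases fallback_text → Spec_pick_localized_alias language_code aliases fallback_text (pick_localized_alias language_code aliases fallback_text)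

-- ===== LEMMAS AND PROOFS =====

-- key invariant: a lookup in A's built dict is exactly B's scan of the entries (initial dict wins)
theorem pv_build_get? (entries : List (List (String × String))) (d : PySem.Dict String String) (c : String) :
    (entries.foldl pvStep d).get? c = (d.get? c).or (pvScanEntries c entries) := by
  induction entries generalizing d with
  | nil => simp [pvScanEntries]
  | cons e rest ih =>
    simp only [List.foldl_cons, pvScanEntries, pvStep]
    by_cases hn : PySem.Str.strip (pvEntryGet e "name") = ""
    · simp [hn, ih]
    · simp only [hn, if_false]
      set l := pvNormLang (PySem.Str.strip (pvEntryGet e "language")) with hl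
      by_cases hc : d.contains l = true
      · simp only [hc, if_true, ih]
        by_cases hcl : l = c
        · subst hcl
          have : (d.get? l).isSome := by rw [← PySem.Dict.contains_eq_isSome_get?]; exact hc
          cases hg : d.get? l with
          | none => rw [hg] at this; simp at this
          | some v => simp
        · simp [hcl]
      · have hcf : d.contains l = false := by simpa using hc
        simp only [hcf, Bool.false_eq_true, if_false, ih]
        have hdnone : d.get? l = none := by
          cases hg : d.get? l with
          | none => rfl
          | some v =>
            have := PySem.Dict.contains_eq_isSome_get? (d := d) (k := l)
            rw [hg] at this; simp [this] at hc
        by_cases hcl : l = c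
        · subst hcl
          rw [PySem.Dict.get?_insert_self, hdnone]
          simp
        · rw [PySem.Dict.get?_insert_of_ne _ _ (Ne.symm hcl)]
          simp [hcl]

theorem pv_scan_some_ne (c : String) (entries : List (List (String × String))) (v : String)
    (h : pvScanEntries c entries = some v) : v ≠ "" := by
  induction entries with
  | nil => simp [pvScanEntries] at h
  | cons e rest ih =>
    simp only [pvScanEntries] at h
    split_ifs at h with h1 h2
    · exact ih h
    · cases h; exact h1
    · exact ih h

theorem pv_firstCode_eq (aliases : List (List (String × String))) (codes : List String) :
    pvFirstCode (aliases.foldl pvStep PySem.Dict.empty) codes = pvScanCodes aliases codes := by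
  induction codes with
  | nil => simp [pvFirstCode, pvScanCodes]
  | cons c cs ih =>
    have hget : (aliases.foldl pvStep PySem.Dict.empty).getD c "" = (pvScanEntries c aliases).getD "" := by
      rw [PySem.Dict.getD_eq_get?_getD, pv_build_get?]
      simp [PySem.Dict.get?_empty]
    simp only [pvFirstCode, pvScanCodes, hget]
    cases hs : pvScanEntries c aliases with
    | none => simp [ih]
    | some v => simp [pv_scan_some_ne c aliases v hs]

theorem pv_normLang_mem (x : String) :
    pvNormLang x ∈ ["ja-JP", "en-US", "zh-CN", "ko-KR"] := by
  simp only [pvNormLang]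
  split_ifs <;> simp

theorem pv_priority_sup (lc : String) (c : String)
    (hc : c ∈ ["ja-JP", "en-US", "zh-CN", "ko-KR"]) : c ∈ pvLangPriority lc := by
  have h4 := pv_normLang_mem lc
  simp only [List.mem_cons, List.not_mem_nil, or_false] at h4 hc
  unfold pvLangPriority
  rcases h4 with h | h | h | h <;> simp only [h] <;>
    rcases hc with rfl | rfl | rfl | rfl <;> decide

theorem pv_scanCodes_none (entries : List (List (String × String))) (codes : List String)
    (h : pvScanCodes entries codes = none) :
    ∀ c ∈ codes, pvScanEntries c entries = none := by
  induction codes with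
  | nil => simp
  | cons c cs ih =>
    intro c' hc'
    simp only [pvScanCodes] at h
    cases hs : pvScanEntries c entries with
    | some v => rw [hs] at h; simp at h
    | none =>
      rw [hs] at h
      rcases List.mem_cons.mp hc' with rfl | hmem
      · exact hs
      · exact ih h c' hmem

theorem pv_scanEntries_none (c : String) (entries : List (List (String × String)))
    (h : pvScanEntries c entries = none) :
    ∀ e ∈ entries, PySem.Str.strip (pvEntryGet e "name") = "" ∨
      pvNormLang (PySem.Str.strip (pvEntryGet e "language")) ≠ c := by
  induction entries with
  | nil => simp
  | cons e rest ih =>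
    intro e' he'
    simp only [pvScanEntries] at h
    split_ifs at h with h1 h2
    · rcases List.mem_cons.mp he' with rfl | hmem
      · exact Or.inl h1
      · exact ih h e' hmem
    · rcases List.mem_cons.mp he' with rfl | hmem
      · exact Or.inr h2
      · exact ih h e' hmem

theorem pv_build_id (entries : List (List (String × String))) (d : PySem.Dict String String)
    (h : ∀ e ∈ entries, PySem.Str.strip (pvEntryGet e "name") = "") :
    entries.foldl pvStep d = d := by
  induction entries generalizing d with
  | nil => rfl
  | cons e rest ih =>
    have he : PySem.Str.strip (pvEntryGet e "name") = "" := h e (by simp)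
    simp only [List.foldl_cons, pvStep, he, if_true]
    exact ih d (fun e' he' => h e' (by simp [he']))

-- ===== VERDICT (by name: the statement is the Claim_ definition above) =====
theorem pick_localized_alias_spec : Claim_equal_pick_localized_alias := by
  intro lc aliases fb _
  show ((pvFirstCode (aliases.foldl pvStep PySem.Dict.empty) (pvLangPriority lc)).or
      (pvFirstVal (aliases.foldl pvStep PySem.Dict.empty).values)).getD (PySem.Str.strip fb) =
    (pvScanCodes aliases (pvLangPriority lc)).getD (PySem.Str.strip fb)
  rw [pv_firstCode_eq]
  cases h : pvScanCodes aliases (pvLangPriority lc) with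
  | some v => simp
  | none =>
    have hnames : ∀ e ∈ aliases, PySem.Str.strip (pvEntryGet e "name") = "" := by
      intro e he
      set c := pvNormLang (PySem.Str.strip (pvEntryGet e "language")) with hc
      have hmem : c ∈ pvLangPriority lc := pv_priority_sup lc c (pv_normLang_mem _)
      have hnone := pv_scanCodes_none aliases _ h c hmem
      rcases pv_scanEntries_none c aliases hnone e he with h1 | h2
      · exact h1
      · exact absurd rfl h2
    rw [pv_build_id aliases _ hnames]
    simp [PySem.Dict.values, PySem.Dict.empty, pvFirstVal]
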